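-- pv_equiv track=rewrite | github.com/trevorhitchcock/Search-Engine | cranfield.py | updateIndex
-- ===== SOURCE A (Python) =====
-- def updateIndex(index, freqArr, query):
--   m = 1
--   # same process as for each file, reads in each word of query, storing it in docNum = 1401 in the index
--   for word in query.split():
--       # if we have not seen the word before, creates a dictionary for the word within the larger dictionary
--       if word not in index:
--         index[word] = {1401: 1}
--       # if we have seen the word before, and have seen it in the query, updates count in dictionary and updates max if applicable
--       elif 1401 in index[word]:
--         index[word][1401] += 1
--         m = max(m, index[word][1401])
--       # if we have seen the word before but not in the query, adds a new entry in the dictionary within the word dictionary for the document number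
--       else:
--         index[word][1401] = 1
--   # updates last entry of max frequency array, which corresponds to the query, including the "document number" that we set to be 1401 as well as the text of the query
--   freqArr[-1] = ((1401,"query"), m)
--   return (index, freqArr)
-- ===== SOURCE B (Python) =====
-- def updateIndex(index, freqArr, query):
--   # Staged, non-mutating rewrite (A mutates index and freqArr in place; B builds
--   # fresh structures — the RETURN value is identical): count the query's words
--   # once, rebuild the index by mapping over its existing entries and appending
--   # the fresh words, and compute m directly from the counts.
--   counts = {}
--   for w in query.split():
--     counts[w] = counts.get(w, 0) + 1
--   out = {}
--   for word, postings in index.items():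
--     if word in counts:
--       d = dict(postings)
--       d[1401] = d.get(1401, 0) + counts[word]
--       out[word] = d
--     else:
--       out[word] = postings
--   for word, c in counts.items():
--     if word not in index:
--       out[word] = {1401: c}
--   m = 1
--   for word, c in counts.items():
--     base = index[word].get(1401, 0) if word in index else 0
--     m = max(m, base + c)
--   return (out, freqArr[:-1] + [((1401, "query"), m)])
-- ===== Notes on version B (the rewrite author's own statement) =====
-- stated objective: alternative
-- what changed: B replaces A's per-occurrence loop with three branches and a conditional running max by staged passes over fresh structures: one counting pass over the query, a single map over the existing index entries (adding each word's whole count at once) plus an append of the fresh words, and a separate max computed directly from the counts and the old index.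
import Mathlib
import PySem

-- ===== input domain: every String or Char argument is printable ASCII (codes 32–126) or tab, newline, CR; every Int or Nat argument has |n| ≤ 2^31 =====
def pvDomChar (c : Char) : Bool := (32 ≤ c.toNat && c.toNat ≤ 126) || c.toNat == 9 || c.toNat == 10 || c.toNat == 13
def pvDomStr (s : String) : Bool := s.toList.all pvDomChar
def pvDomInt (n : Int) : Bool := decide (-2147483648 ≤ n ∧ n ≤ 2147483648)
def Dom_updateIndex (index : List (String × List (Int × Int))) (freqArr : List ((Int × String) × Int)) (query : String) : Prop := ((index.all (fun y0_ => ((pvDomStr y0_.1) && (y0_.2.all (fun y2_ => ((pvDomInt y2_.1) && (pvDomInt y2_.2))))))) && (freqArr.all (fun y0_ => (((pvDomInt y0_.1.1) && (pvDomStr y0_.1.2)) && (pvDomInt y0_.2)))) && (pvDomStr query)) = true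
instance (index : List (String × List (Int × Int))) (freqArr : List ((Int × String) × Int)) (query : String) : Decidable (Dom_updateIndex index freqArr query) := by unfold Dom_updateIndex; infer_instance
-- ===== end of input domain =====

-- B replaces A's per-occurrence three-branch dict loop by staged passes: count the
-- query's words once, rebuild the index as a list map plus appended fresh words, and
-- compute the max directly from the counts (objective: alternative decomposition,
-- same cost). The Python A mutates `index` and `freqArr` in place while B builds
-- fresh structures; the theorem is about the returned value only.


-- ===== PORT A =====
-- A's loop body: the three branches on `word` and the conditional max update
def uiStepA (s : PySem.Dict String (PySem.Dict Int Int) × Int) (word : String) :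
    PySem.Dict String (PySem.Dict Int Int) × Int :=
  if s.1.contains word = false then
    (s.1.insert word (PySem.Dict.mk [(1401, 1)]), s.2)
  else
    let dw := s.1.getD word (PySem.Dict.mk [])
    if dw.contains 1401 then
      let v := dw.getD 1401 0 + 1
      (s.1.insert word (dw.insert 1401 v), max s.2 v)
    else
      (s.1.insert word (dw.insert 1401 1), s.2)

def updateIndex (index : List (String × List (Int × Int))) (freqArr : List ((Int × String) × Int)) (query : String) : (List (String × List (Int × Int))) × (List ((Int × String) × Int)) :=
  let d0 : PySem.Dict String (PySem.Dict Int Int) :=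
    PySem.Dict.mk (index.map (fun p => (p.1, PySem.Dict.mk p.2)))
  let st := (PySem.Str.split₀ query).foldl uiStepA (d0, 1)
  (st.1.items.map (fun p => (p.1, p.2.items)),
   PySem.List.pySetD freqArr (-1) ((1401, "query"), st.2))

-- ===== PORT B =====
-- Source B's `d[1401] = d.get(1401, 0) + c` on an assoc list with unique keys:
-- add c to the first 1401 entry in place, append (1401, c) if absent
def bumpPost : List (Int × Int) → Int → List (Int × Int)
  | [], c => [(1401, c)]
  | (k, v) :: rest, c => if k = 1401 then (1401, v + c) :: rest else (k, v) :: bumpPost rest c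

-- Source B's `postings.get(1401, 0)`
def get1401 : List (Int × Int) → Int
  | [] => 0
  | (k, v) :: rest => if k = 1401 then v else get1401 rest

def updateIndex_alt (index : List (String × List (Int × Int))) (freqArr : List ((Int × String) × Int)) (query : String) : (List (String × List (Int × Int))) × (List ((Int × String) × Int)) :=
  let counts : PySem.Dict String Int :=
    (PySem.Str.split₀ query).foldl (fun d w => d.insert w (d.getD w 0 + 1)) (PySem.Dict.mk [])
  let out1 := index.map (fun p =>
    if counts.contains p.1 then (p.1, bumpPost p.2 (counts.getD p.1 0)) else p)
  let fresh := (counts.items.filter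
      (fun q => (index.find? (fun p => p.1 == q.1)).isNone)).map
      (fun q => (q.1, [(1401, q.2)]))
  let m := counts.items.foldl (fun m q =>
      max m ((match index.find? (fun p => p.1 == q.1) with
              | some p => get1401 p.2
              | none => 0) + q.2)) 1
  (out1 ++ fresh, freqArr.dropLast ++ [((1401, "query"), m)])

-- ===== PRECONDITION & SPEC =====
-- Pre_ excludes (a) empty freqArr, on which the Python A raises IndexError at
-- `freqArr[-1] = …`, and (b) association lists with duplicate keys (outer or inner),
-- which represent no Python dict — both arguments arrive as dicts in Python, whose
-- keys are unique, so no input A returns on is excluded.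
def Pre_updateIndex (index : List (String × List (Int × Int))) (freqArr : List ((Int × String) × Int)) (query : String) : Prop :=
  freqArr ≠ [] ∧ (index.map Prod.fst).Nodup ∧ ∀ p ∈ index, (p.2.map Prod.fst).Nodup
instance (index : List (String × List (Int × Int))) (freqArr : List ((Int × String) × Int)) (query : String) : Decidable (Pre_updateIndex index freqArr query) := by unfold Pre_updateIndex; infer_instance
def pvWitness_updateIndex : (List (String × List (Int × Int))) × (List ((Int × String) × Int)) × String :=
  ([("a", [(1401, 2)]), ("b", [(7, 1)])], [((0, "x"), 3)], "a b a c")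

def Spec_updateIndex (index : List (String × List (Int × Int))) (freqArr : List ((Int × String) × Int)) (query : String) (out : (List (String × List (Int × Int))) × (List ((Int × String) × Int))) : Prop := out = updateIndex_alt index freqArr query
instance (index : List (String × List (Int × Int))) (freqArr : List ((Int × String) × Int)) (query : String) (out : (List (String × List (Int × Int))) × (List ((Int × String) × Int))) : Decidable (Spec_updateIndex index freqArr query out) := by unfold Spec_updateIndex; infer_instance

-- ===== CLAIM (what is proved, stated in full; the proofs are below) =====
def Claim_equal_updateIndex : Prop := ∀ (index : List (String × List (Int × Int))) (freqArr : List ((Int × String) × Int)) (query : String), Dom_updateIndex index freqArr query → Pre_updateIndex index freqArr query → Spec_updateIndex index freqArr query (updateIndex index freqArr query)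
-- ===== LEMMAS AND PROOFS =====

-- proof-only intermediate: A's loop with each distinct word's contribution applied at once
def uiStepB (s : PySem.Dict String (PySem.Dict Int Int) × Int) (p : String × Int) :
    PySem.Dict String (PySem.Dict Int Int) × Int :=
  let idx1 := s.1.setdefault p.1 (PySem.Dict.mk [])
  let dw := idx1.getD p.1 (PySem.Dict.mk [])
  let v := dw.getD 1401 0 + p.2
  (idx1.insert p.1 (dw.insert 1401 v), max s.2 v)

theorem keys_ne_of_not_contains {κ ν : Type} [BEq κ] (d : PySem.Dict κ ν) {k : κ}
    (h : d.contains k = false) : ∀ q ∈ d.items, (q.1 == k) = false := by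
  intro q hq
  simpa using List.any_eq_false.mp h q hq

theorem setdefault_insert_self {κ ν : Type} [BEq κ] [LawfulBEq κ]
    (d : PySem.Dict κ ν) (k : κ) (x vp : ν) :
    (d.setdefault k x).insert k vp = d.insert k vp := by
  by_cases hk : d.contains k = true
  · rw [PySem.Dict.setdefault_of_contains _ _ hk]
  · rw [PySem.Dict.setdefault_of_not_contains _ _ (by simpa using hk),
        PySem.Dict.insert_insert_self]

theorem insert_comm_of_contains {κ ν : Type} [BEq κ] [LawfulBEq κ]
    (d : PySem.Dict κ ν) (k w : κ) (vp vw : ν) (hne : k ≠ w) (hw : d.contains w = true) :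
    (d.insert k vp).insert w vw = (d.insert w vw).insert k vp := by
  have hkw : (k == w) = false := beq_eq_false_iff_ne.mpr hne
  have hwk : (w == k) = false := beq_eq_false_iff_ne.mpr (Ne.symm hne)
  by_cases hk : d.contains k = true
  · apply PySem.Dict.ext
    rw [PySem.Dict.items_insert_of_contains _ _ (by simp [PySem.Dict.contains_insert, hw]),
        PySem.Dict.items_insert_of_contains _ _ hk,
        PySem.Dict.items_insert_of_contains _ _ (by simp [PySem.Dict.contains_insert, hk]),
        PySem.Dict.items_insert_of_contains _ _ hw]
    simp only [List.map_map]
    apply List.map_congr_left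
    intro q _
    by_cases h1 : (q.1 == k) = true <;> by_cases h2 : (q.1 == w) = true <;>
      simp_all [Function.comp]
  · simp only [Bool.not_eq_true] at hk
    have hne_items := keys_ne_of_not_contains d hk
    have hk' : (d.insert w vw).contains k = false := by
      simp only [PySem.Dict.contains_insert, hkw, Bool.false_or]; exact hk
    apply PySem.Dict.ext
    rw [PySem.Dict.items_insert_of_contains _ _ (by simp [PySem.Dict.contains_insert, hw]),
        PySem.Dict.items_insert_of_not_contains _ _ hk,
        PySem.Dict.items_insert_of_not_contains _ _ hk',
        PySem.Dict.items_insert_of_contains _ _ hw]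
    rw [List.map_append]
    congr 1
    simp [hkw]

theorem stepA_eq_stepB_one (s : PySem.Dict String (PySem.Dict Int Int) × Int) (w : String)
    (hm : 1 ≤ s.2) : uiStepA s w = uiStepB s (w, 1) := by
  obtain ⟨idx, m⟩ := s
  by_cases hc : idx.contains w = true
  · simp only [uiStepA, uiStepB, hc, Bool.true_eq_false, if_false,
      PySem.Dict.setdefault_of_contains _ _ hc]
    by_cases h14 : (idx.getD w (PySem.Dict.mk [])).contains 1401 = true
    · simp [h14]
    · simp only [Bool.not_eq_true] at h14
      simp [h14, PySem.Dict.getD_of_not_contains _ _ h14, max_eq_left hm]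
  · simp only [Bool.not_eq_true] at hc
    simp only [uiStepA, uiStepB, hc, if_true,
      PySem.Dict.setdefault_of_not_contains _ _ hc, PySem.Dict.getD_insert_self,
      PySem.Dict.insert_insert_self]
    norm_num [PySem.Dict.getD, PySem.Dict.get?, Prod.ext_iff, max_eq_left hm]
    congr 1

theorem stepA_stepB_absorb (s : PySem.Dict String (PySem.Dict Int Int) × Int) (w : String) (c : Int) :
    uiStepA (uiStepB s (w, c)) w = uiStepB s (w, c + 1) := by
  obtain ⟨idx, m⟩ := s
  simp only [uiStepB, uiStepA, PySem.Dict.contains_insert, BEq.rfl, Bool.true_or,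
    Bool.true_eq_false, if_false, PySem.Dict.getD_insert_self, PySem.Dict.insert_insert_self,
    PySem.Dict.getD_setdefault_self, PySem.Dict.contains_insert]
  rw [if_pos (by simp)]
  refine Prod.ext ?_ ?_
  · simp only []
    congr 2
    ring
  · simp only []
    omega

theorem stepA_stepB_comm (s : PySem.Dict String (PySem.Dict Int Int) × Int) (w : String)
    (p : String × Int) (hne : p.1 ≠ w) (hw : s.1.contains w = true) :
    uiStepA (uiStepB s p) w = uiStepB (uiStepA s w) p := by
  obtain ⟨idx, m⟩ := s
  obtain ⟨k, c⟩ := p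
  simp only at hne hw
  have hgw : ∀ (V : PySem.Dict Int Int) d0, (idx.insert k V).getD w d0 = idx.getD w d0 :=
    fun V d0 => PySem.Dict.getD_insert_of_ne _ _ _ (Ne.symm hne)
  have hgk : ∀ (V : PySem.Dict Int Int) d0, (idx.insert w V).getD k d0 = idx.getD k d0 :=
    fun V d0 => PySem.Dict.getD_insert_of_ne _ _ _ hne
  have hcw : ∀ (V : PySem.Dict Int Int), (idx.insert k V).contains w = true := by
    intro V; simp [PySem.Dict.contains_insert, hw]
  by_cases h14 : (idx.getD w (PySem.Dict.mk [])).contains 1401 = true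
  · simp only [uiStepB, uiStepA, PySem.Dict.getD_setdefault_self, setdefault_insert_self,
      hgw, hcw, hw, h14, Bool.true_eq_false, if_false, if_true]
    simp only [hgk]
    refine Prod.ext (insert_comm_of_contains _ _ _ _ _ hne hw) ?_
    simp only []
    omega
  · simp only [Bool.not_eq_true] at h14
    simp only [uiStepB, uiStepA, PySem.Dict.getD_setdefault_self, setdefault_insert_self,
      hgw, hcw, hw, h14, Bool.true_eq_false, Bool.false_eq_true, if_false]
    simp only [hgk]
    exact Prod.ext (insert_comm_of_contains _ _ _ _ _ hne hw) rfl

theorem stepB_mono (s : PySem.Dict String (PySem.Dict Int Int) × Int) (p : String × Int) :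
    s.2 ≤ (uiStepB s p).2 := by
  simp [uiStepB]

theorem foldlB_mono (l : List (String × Int)) (s : PySem.Dict String (PySem.Dict Int Int) × Int) :
    s.2 ≤ (l.foldl uiStepB s).2 := by
  induction l generalizing s with
  | nil => simp
  | cons p l ih => exact le_trans (stepB_mono s p) (ih _)

theorem stepB_contains (s : PySem.Dict String (PySem.Dict Int Int) × Int) (p : String × Int)
    (w : String) (h : s.1.contains w = true) : (uiStepB s p).1.contains w = true := by
  simp [uiStepB, PySem.Dict.contains_insert, PySem.Dict.contains_setdefault, h]

theorem stepB_contains_self (s : PySem.Dict String (PySem.Dict Int Int) × Int)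
    (p : String × Int) : (uiStepB s p).1.contains p.1 = true := by
  simp [uiStepB]

theorem stepA_push (l : List (String × Int)) (w : String)
    (s : PySem.Dict String (PySem.Dict Int Int) × Int)
    (hl : ∀ p ∈ l, p.1 ≠ w) (hw : s.1.contains w = true) :
    uiStepA (l.foldl uiStepB s) w = l.foldl uiStepB (uiStepA s w) := by
  induction l generalizing s with
  | nil => rfl
  | cons p l ih =>
    simp only [List.foldl_cons]
    rw [ih _ (fun q hq => hl q (by simp [hq])) (stepB_contains _ _ _ hw),
        stepA_stepB_comm s w p (hl p (by simp)) hw]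

theorem fold_correspond (ws : List String) (s : PySem.Dict String (PySem.Dict Int Int) × Int)
    (hm : 1 ≤ s.2) :
    ws.foldl uiStepA s = (PySem.Dict.counter ws).items.foldl uiStepB s := by
  induction ws using List.reverseRecOn with
  | nil => rfl
  | append_singleton ws x ih =>
    rw [List.foldl_append, List.foldl_cons, List.foldl_nil, ih,
        PySem.Dict.counter_append_singleton]
    by_cases hc : (PySem.Dict.counter ws).contains x = true
    · have hx : x ∈ (PySem.Dict.counter ws).keys :=
        (PySem.Dict.contains_iff_mem_keys _ _).mp hc
      simp only [PySem.Dict.keys, List.mem_map] at hx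
      obtain ⟨⟨x', v⟩, hmem, hfst⟩ := hx
      cases hfst
      obtain ⟨l1, l2, hsplit⟩ := List.append_of_mem hmem
      have hnd := PySem.Dict.nodup_keys_counter ws
      have hnd2 := hnd
      rw [PySem.Dict.keys, hsplit, List.map_append, List.map_cons, List.nodup_middle] at hnd2
      have hnotmem := (List.nodup_cons.mp hnd2).1
      have hl1 : ∀ q ∈ l1, q.1 ≠ x' := by
        intro q hq h
        exact hnotmem (List.mem_append_left _ (List.mem_map.mpr ⟨q, hq, h⟩))
      have hl2 : ∀ q ∈ l2, q.1 ≠ x' := by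
        intro q hq h
        exact hnotmem (List.mem_append_right _ (List.mem_map.mpr ⟨q, hq, h⟩))
      have hgd : (PySem.Dict.counter ws).getD x' 0 = v :=
        PySem.Dict.getD_of_mem_items _ hmem hnd 0
      have hitems : ((PySem.Dict.counter ws).modify x' 0 (· + 1)).items
          = l1 ++ (x', v + 1) :: l2 := by
        show ((PySem.Dict.counter ws).insert x' ((PySem.Dict.counter ws).getD x' 0 + 1)).items = _
        rw [PySem.Dict.items_insert_of_contains _ _ hc, hgd, hsplit, List.map_append,
          List.map_cons]
        congr 1
        · refine (List.map_congr_left ?_).trans (List.map_id l1)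
          intro q hq
          simp [beq_eq_false_iff_ne.mpr (hl1 q hq)]
        · simp only [BEq.rfl, if_true]
          congr 1
          refine (List.map_congr_left ?_).trans (List.map_id l2)
          intro q hq
          simp [beq_eq_false_iff_ne.mpr (hl2 q hq)]
      rw [hitems, hsplit, List.foldl_append, List.foldl_append, List.foldl_cons,
          List.foldl_cons]
      rw [stepA_push l2 x' _ (fun q hq h => hl2 q hq h) (stepB_contains_self _ _),
          stepA_stepB_absorb]
    · simp only [Bool.not_eq_true] at hc
      have hitems : ((PySem.Dict.counter ws).modify x 0 (· + 1)).items
          = (PySem.Dict.counter ws).items ++ [(x, 1)] := by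
        show ((PySem.Dict.counter ws).insert x ((PySem.Dict.counter ws).getD x 0 + 1)).items = _
        rw [PySem.Dict.getD_of_not_contains _ _ hc,
            PySem.Dict.items_insert_of_not_contains _ _ hc]
        norm_num
      rw [hitems, List.foldl_append, List.foldl_cons, List.foldl_nil,
          stepA_eq_stepB_one _ _ (le_trans hm (foldlB_mono _ _))]

-- === characterization of the aggregated fold as B's staged construction ===

def bumpD (K : List (String × Int)) (r : String × PySem.Dict Int Int) :
    String × PySem.Dict Int Int :=
  match K.find? (fun q => q.1 == r.1) with
  | some q => (r.1, r.2.insert 1401 (r.2.getD 1401 0 + q.2))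
  | none => r


def baseOf (d : PySem.Dict String (PySem.Dict Int Int)) (w : String) : Int :=
  (d.getD w (PySem.Dict.mk [])).getD 1401 0


theorem stepB_snd (d : PySem.Dict String (PySem.Dict Int Int)) (m : Int) (p : String × Int) :
    (uiStepB (d, m) p).2 = max m (baseOf d p.1 + p.2) := by
  simp [uiStepB, baseOf, PySem.Dict.getD_setdefault_self]


theorem stepB_base_of_ne (d : PySem.Dict String (PySem.Dict Int Int)) (m : Int)
    (p : String × Int) (w : String) (hne : w ≠ p.1) :
    baseOf (uiStepB (d, m) p).1 w = baseOf d w := by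
  unfold baseOf uiStepB
  simp only []
  rw [PySem.Dict.getD_insert_of_ne _ _ _ hne]
  by_cases hc : d.contains p.1 = true
  · rw [PySem.Dict.setdefault_of_contains _ _ hc]
  · rw [PySem.Dict.setdefault_of_not_contains _ _ (by simpa using hc),
        PySem.Dict.getD_insert_of_ne _ _ _ hne]


theorem foldB_m (K : List (String × Int)) (d : PySem.Dict String (PySem.Dict Int Int)) (m : Int)
    (hK : (K.map Prod.fst).Nodup) :
    (K.foldl uiStepB (d, m)).2 = K.foldl (fun m q => max m (baseOf d q.1 + q.2)) m := by
  induction K generalizing d m with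
  | nil => rfl
  | cons p K ih =>
    simp only [List.map_cons, List.nodup_cons] at hK
    simp only [List.foldl_cons]
    have hstep : uiStepB (d, m) p = ((uiStepB (d, m) p).1, max m (baseOf d p.1 + p.2)) := by
      rw [← stepB_snd d m p]
    rw [hstep, ih _ _ hK.2]
    apply List.foldl_ext
    intro a q hq
    rw [stepB_base_of_ne d m p q.1 (fun h => hK.1 (List.mem_map.mpr ⟨q, hq, h⟩))]


theorem bumpD_not_mem (K : List (String × Int)) (r : String × PySem.Dict Int Int)
    (h : r.1 ∉ K.map Prod.fst) : bumpD K r = r := by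
  unfold bumpD
  rw [List.find?_eq_none.mpr ?_]
  intro q hq hbeq
  exact h (List.mem_map.mpr ⟨q, hq, by simpa using hbeq⟩)


theorem stepB_fst_contains (d : PySem.Dict String (PySem.Dict Int Int)) (m : Int)
    (p : String × Int) (hc : d.contains p.1 = true) :
    (uiStepB (d, m) p).1
      = d.insert p.1 ((d.getD p.1 (PySem.Dict.mk [])).insert 1401
          ((d.getD p.1 (PySem.Dict.mk [])).getD 1401 0 + p.2)) := by
  simp [uiStepB, PySem.Dict.setdefault_of_contains _ _ hc]


theorem stepB_fst_fresh (d : PySem.Dict String (PySem.Dict Int Int)) (m : Int)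
    (p : String × Int) (hc : d.contains p.1 = false) :
    (uiStepB (d, m) p).1 = d.insert p.1 (PySem.Dict.mk [(1401, 0 + p.2)]) := by
  simp only [uiStepB, PySem.Dict.setdefault_of_not_contains _ _ hc,
    PySem.Dict.getD_insert_self, PySem.Dict.insert_insert_self, PySem.Dict.getD_setdefault_self]
  congr 1


theorem foldB_items (K : List (String × Int)) (d : PySem.Dict String (PySem.Dict Int Int)) (m : Int)
    (hK : (K.map Prod.fst).Nodup) (hd : d.keys.Nodup) :
    (K.foldl uiStepB (d, m)).1.items =
      d.items.map (bumpD K) ++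
      (K.filter (fun q => !d.contains q.1)).map (fun q => (q.1, PySem.Dict.mk [(1401, q.2)])) := by
  induction K generalizing d m with
  | nil =>
    simp only [List.foldl_nil, List.filter_nil, List.map_nil, List.append_nil]
    exact ((List.map_congr_left (fun r _ => bumpD_not_mem [] r (by simp))).trans
      (List.map_id _)).symm
  | cons p K ih =>
    simp only [List.map_cons, List.nodup_cons] at hK
    simp only [List.foldl_cons]
    have hne : ∀ q ∈ K, q.1 ≠ p.1 := fun q hq h => hK.1 (List.mem_map.mpr ⟨q, hq, h⟩)
    by_cases hc : d.contains p.1 = true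
    · have hd' : ((uiStepB (d, m) p).1).keys.Nodup := by
        rw [stepB_fst_contains d m p hc, PySem.Dict.keys_insert_of_contains _ _ hc]
        exact hd
      rw [ih _ _ hK.2 hd']
      have hfil : K.filter (fun q => !(uiStepB (d, m) p).1.contains q.1)
          = K.filter (fun q => !d.contains q.1) := by
        apply List.filter_congr
        intro q hq
        rw [stepB_fst_contains d m p hc, PySem.Dict.contains_insert,
            beq_eq_false_iff_ne.mpr (hne q hq), Bool.false_or]
      rw [hfil, List.filter_cons_of_neg (by simp [hc])]
      congr 1
      rw [stepB_fst_contains d m p hc, PySem.Dict.items_insert_of_contains _ _ hc,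
          List.map_map]
      apply List.map_congr_left
      intro r hr
      by_cases hb : (r.1 == p.1) = true
      · have hr1 : r.1 = p.1 := by simpa using hb
        have hr2 : d.getD r.1 (PySem.Dict.mk []) = r.2 :=
          PySem.Dict.getD_of_mem_items _ hr hd _
        have hfind : (p :: K).find? (fun q => q.1 == r.1) = some p :=
          List.find?_cons_of_pos (by simp [hr1])
        simp only [Function.comp_apply, hb, if_true]
        rw [bumpD_not_mem _ _ hK.1]
        unfold bumpD
        rw [hfind]
        rw [hr1] at hr2
        rw [hr2, hr1]
      · have hnb : (p.1 == r.1) = false :=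
          beq_eq_false_iff_ne.mpr (fun h => (by simpa using hb : ¬ r.1 = p.1) h.symm)
        show bumpD K (if (r.1 == p.1) = true then _ else r) = bumpD (p :: K) r
        rw [if_neg (by simp [hb])]
        unfold bumpD
        rw [List.find?_cons_of_neg (by simp [hnb])]
    · simp only [Bool.not_eq_true] at hc
      have hd' : ((uiStepB (d, m) p).1).keys.Nodup := by
        rw [stepB_fst_fresh d m p hc, PySem.Dict.keys_insert_of_not_contains _ _ hc,
            List.nodup_append]
        refine ⟨hd, List.nodup_singleton _, ?_⟩
        intro a ha b hbmem heq
        rw [List.mem_singleton] at hbmem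
        exact absurd ((PySem.Dict.contains_iff_mem_keys _ _).mpr ((heq.trans hbmem) ▸ ha))
          (by simp [hc])
      rw [ih _ _ hK.2 hd']
      have hfil : K.filter (fun q => !(uiStepB (d, m) p).1.contains q.1)
          = K.filter (fun q => !d.contains q.1) := by
        apply List.filter_congr
        intro q hq
        rw [stepB_fst_fresh d m p hc, PySem.Dict.contains_insert,
            beq_eq_false_iff_ne.mpr (hne q hq), Bool.false_or]
      have hmap : d.items.map (bumpD K) = d.items.map (bumpD (p :: K)) := by
        apply List.map_congr_left
        intro r hr
        have hrk : r.1 ∈ d.keys := PySem.Dict.mem_keys_of_mem_items _ hr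
        have hnp : p.1 ≠ r.1 := fun h =>
          absurd ((PySem.Dict.contains_iff_mem_keys _ _).mpr (h ▸ hrk)) (by simp [hc])
        unfold bumpD
        rw [List.find?_cons_of_neg (by simp [beq_eq_false_iff_ne.mpr hnp])]
      rw [hfil, stepB_fst_fresh d m p hc, PySem.Dict.items_insert_of_not_contains _ _ hc,
          List.map_append, hmap, List.filter_cons_of_pos (by simp [hc]), List.map_cons,
          bumpD_not_mem K _ hK.1]
      simp


theorem getD_mk_eq_get1401 (l : List (Int × Int)) :
    (PySem.Dict.mk l).getD 1401 0 = get1401 l := by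
  induction l with
  | nil => rfl
  | cons p rest ih =>
    obtain ⟨k, v⟩ := p
    rw [PySem.Dict.getD_eq_get?_getD, PySem.Dict.get?_mk_cons]
    by_cases hk : k = (1401 : Int)
    · simp [hk, get1401]
    · rw [beq_eq_false_iff_ne.mpr hk, if_neg (by simp)]
      rw [← PySem.Dict.getD_eq_get?_getD, ih]
      simp [get1401, hk]


theorem contains_mk_1401 (k : Int) (v : Int) (rest : List (Int × Int)) :
    (PySem.Dict.mk ((k, v) :: rest)).contains 1401
      = ((k == 1401) || (PySem.Dict.mk rest).contains 1401) := rfl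


theorem items_bump (l : List (Int × Int)) (hl : (l.map Prod.fst).Nodup) (c : Int) :
    ((PySem.Dict.mk l).insert 1401 ((PySem.Dict.mk l).getD 1401 0 + c)).items
      = bumpPost l c := by
  induction l with
  | nil =>
    rw [PySem.Dict.items_insert_of_not_contains _ _ (by rfl)]
    simp [bumpPost, getD_mk_eq_get1401, get1401]
  | cons p rest ih =>
    obtain ⟨k, v⟩ := p
    simp only [List.map_cons, List.nodup_cons] at hl
    by_cases hk : k = (1401 : Int)
    · have hcon : (PySem.Dict.mk ((k, v) :: rest)).contains 1401 = true := by
        rw [contains_mk_1401]; simp [hk]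
      have hgd : (PySem.Dict.mk ((k, v) :: rest)).getD 1401 0 = v := by
        rw [PySem.Dict.getD_eq_get?_getD, PySem.Dict.get?_mk_cons]
        simp [hk]
      rw [PySem.Dict.items_insert_of_contains _ _ hcon, hgd]
      show ((k, v) :: rest).map (fun q => if q.1 == (1401:Int) then ((1401:Int), v + c) else q)
            = bumpPost ((k, v) :: rest) c
      rw [List.map_cons, if_pos (by simp [hk])]
      simp only [bumpPost, if_pos hk]
      congr 1
      refine (List.map_congr_left ?_).trans (List.map_id rest)
      intro q hq
      have : q.1 ≠ (1401 : Int) := fun h => (hk ▸ hl.1) (List.mem_map.mpr ⟨q, hq, h⟩)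
      simp [beq_eq_false_iff_ne.mpr this]
    · have hgd : (PySem.Dict.mk ((k, v) :: rest)).getD 1401 0
          = (PySem.Dict.mk rest).getD 1401 0 := by
        rw [PySem.Dict.getD_eq_get?_getD, PySem.Dict.get?_mk_cons,
            beq_eq_false_iff_ne.mpr hk, if_neg (by simp), ← PySem.Dict.getD_eq_get?_getD]
      have hcc : (PySem.Dict.mk ((k, v) :: rest)).contains 1401
          = (PySem.Dict.mk rest).contains 1401 := by
        rw [contains_mk_1401, beq_eq_false_iff_ne.mpr hk, Bool.false_or]
      by_cases hcr : (PySem.Dict.mk rest).contains 1401 = true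
      · rw [PySem.Dict.items_insert_of_contains _ _ (hcc ▸ hcr), hgd]
        show ((k, v) :: rest).map (fun q => if q.1 == (1401:Int)
              then ((1401:Int), (PySem.Dict.mk rest).getD 1401 0 + c) else q)
            = bumpPost ((k, v) :: rest) c
        rw [List.map_cons, if_neg (by simp [beq_eq_false_iff_ne.mpr hk])]
        simp only [bumpPost, if_neg hk]
        congr 1
        rw [← PySem.Dict.items_insert_of_contains _ _ hcr, ih hl.2]
      · have hcr' : (PySem.Dict.mk rest).contains 1401 = false := by
          simp only [Bool.not_eq_true] at hcr; exact hcr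
        rw [PySem.Dict.items_insert_of_not_contains _ _ (by rw [hcc]; exact hcr'), hgd]
        show ((k, v) :: rest) ++ [((1401:Int), (PySem.Dict.mk rest).getD 1401 0 + c)]
            = bumpPost ((k, v) :: rest) c
        simp only [bumpPost, if_neg hk, List.cons_append]
        congr 1
        rw [← PySem.Dict.items_insert_of_not_contains _ _ hcr', ih hl.2]


theorem set_last {α : Type} (l : List α) (x : α) (h : l ≠ []) :
    PySem.List.pySetD l (-1) x = l.dropLast ++ [x] := by
  have hlen : 1 ≤ l.length := List.length_pos_iff.mpr h
  simp only [PySem.List.pySetD, PySem.List.pySet?, PySem.List.pyIdx?]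
  induction l using List.reverseRecOn with
  | nil => simp at h
  | append_singleton ys a _ =>
    simp [List.set_append]

-- ===== VERDICT (by name: the statement is the Claim_ definition above) =====
theorem d0_keys_nodup (index : List (String × List (Int × Int)))
    (h : (index.map Prod.fst).Nodup) :
    (PySem.Dict.mk (index.map (fun p => (p.1, PySem.Dict.mk p.2)))).keys.Nodup := by
  simpa [PySem.Dict.keys, List.map_map, Function.comp] using h

theorem counter_items_keys_nodup (ws : List String) :
    ((PySem.Dict.counter ws).items.map Prod.fst).Nodup := by
  simpa [PySem.Dict.keys] using PySem.Dict.nodup_keys_counter ws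

theorem baseOf_d0 (index : List (String × List (Int × Int))) (w : String) :
    baseOf (PySem.Dict.mk (index.map (fun p => (p.1, PySem.Dict.mk p.2)))) w
      = match index.find? (fun p => p.1 == w) with
        | some p => get1401 p.2
        | none => 0 := by
  induction index with
  | nil => rfl
  | cons p rest ih =>
    unfold baseOf
    rw [List.map_cons]
    rw [PySem.Dict.getD_eq_get?_getD (PySem.Dict.mk ((p.1, PySem.Dict.mk p.2) :: _)),
        PySem.Dict.get?_mk_cons]
    by_cases hb : (p.1 == w) = true
    · rw [if_pos (by simp [hb]), List.find?_cons_of_pos (by simpa using hb)]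
      simp [getD_mk_eq_get1401]
    · rw [if_neg (by simp [hb]), List.find?_cons_of_neg (by simp [hb]),
          ← PySem.Dict.getD_eq_get?_getD]
      exact ih

theorem updateIndex_spec : Claim_equal_updateIndex := by
  intro index freqArr query _ hpre
  obtain ⟨hfa, hout, hin⟩ := hpre
  unfold Spec_updateIndex updateIndex updateIndex_alt
  dsimp only
  have hcnt : (PySem.Str.split₀ query).foldl (fun d w => d.insert w (d.getD w 0 + 1))
      (PySem.Dict.mk []) = PySem.Dict.counter (PySem.Str.split₀ query) :=
    PySem.Dict.foldl_insert_getD_add_one_eq_counter _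
  rw [hcnt]
  set ws := PySem.Str.split₀ query with hws
  set d0 : PySem.Dict String (PySem.Dict Int Int) :=
    PySem.Dict.mk (index.map (fun p => (p.1, PySem.Dict.mk p.2))) with hd0
  set K := PySem.Dict.counter ws with hKdef
  have hKnd : (K.items.map Prod.fst).Nodup := counter_items_keys_nodup ws
  have hd0nd : d0.keys.Nodup := d0_keys_nodup index hout
  rw [fold_correspond ws (d0, 1) (by norm_num), ← hKdef]
  have hm : (List.foldl uiStepB (d0, 1) K.items).2 =
      K.items.foldl (fun m q =>
        max m ((match index.find? (fun p => p.1 == q.1) with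
                | some p => get1401 p.2
                | none => 0) + q.2)) 1 := by
    rw [foldB_m K.items d0 1 hKnd]
    apply List.foldl_ext
    intro a q _
    rw [hd0, baseOf_d0 index q.1]
  refine Prod.ext ?_ ?_
  · show (List.foldl uiStepB (d0, 1) K.items).1.items.map (fun p => (p.1, p.2.items)) = _
    rw [foldB_items K.items d0 1 hKnd hd0nd, List.map_append]
    congr 1
    · show ((index.map (fun p => (p.1, PySem.Dict.mk p.2))).map (bumpD K.items)).map
          (fun p => (p.1, p.2.items)) = _
      rw [List.map_map, List.map_map]
      apply List.map_congr_left
      intro p hp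
      show (fun r => (r.1, r.2.items)) (bumpD K.items (p.1, PySem.Dict.mk p.2))
          = if K.contains p.1 = true then (p.1, bumpPost p.2 (K.getD p.1 0)) else p
      unfold bumpD
      cases hf : K.items.find? (fun q => q.1 == p.1) with
      | none =>
        have hcon : K.contains p.1 = false := by
          show K.items.any (fun q => q.1 == p.1) = false
          exact List.any_eq_false.mpr (List.find?_eq_none.mp hf)
        rw [if_neg (by simp [hcon])]
      | some q =>
        have hq1 : q.1 = p.1 := by
          have := List.find?_some hf
          simpa using this
        have hqmem : q ∈ K.items := List.mem_of_find?_eq_some hf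
        have hcon : K.contains p.1 = true := by
          show K.items.any (fun q => q.1 == p.1) = true
          exact List.any_eq_true.mpr ⟨q, hqmem, by simp [hq1]⟩
        have hgd : K.getD p.1 0 = q.2 := by
          have hm2 : (p.1, q.2) ∈ K.items := by
            have := hqmem
            rwa [show q = (p.1, q.2) from by rw [← hq1]] at this
          exact PySem.Dict.getD_of_mem_items _ hm2
            (by simpa [PySem.Dict.keys] using hKnd) 0
        rw [if_pos hcon, hgd]
        show (p.1, ((PySem.Dict.mk p.2).insert 1401
            ((PySem.Dict.mk p.2).getD 1401 0 + q.2)).items) = (p.1, bumpPost p.2 q.2)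
        rw [items_bump p.2 (hin p hp) q.2]
    · rw [List.map_map]
      have hfil : K.items.filter (fun q => !d0.contains q.1)
          = K.items.filter (fun q => (index.find? (fun p => p.1 == q.1)).isNone) := by
        apply List.filter_congr
        intro q _
        have hany : d0.contains q.1 = index.any (fun p => p.1 == q.1) := by
          show (index.map (fun p => (p.1, PySem.Dict.mk p.2))).any (fun r => r.1 == q.1)
              = index.any (fun p => p.1 == q.1)
          rw [List.any_map]
          rfl
        rw [hany]
        cases hfi : index.find? (fun p => p.1 == q.1) with
        | none =>
          rw [List.any_eq_false.mpr (List.find?_eq_none.mp hfi)]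
          rfl
        | some r =>
          rw [List.any_eq_true.mpr ⟨r, List.mem_of_find?_eq_some hfi, List.find?_some hfi⟩]
          rfl
      rw [hfil]
      rfl
  · show PySem.List.pySetD freqArr (-1) ((1401, "query"), (List.foldl uiStepB (d0, 1) K.items).2) = _
    rw [hm, set_last freqArr _ hfa]
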